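-- pv_equiv track=rewrite | github.com/ProgramFan/bentoo | bentoo/common/helpers2.py | make_process_grid
-- ===== SOURCE A (Python) =====
-- import functools
--
-- def make_process_grid(n, dim):
--     def is_prime(x):
--         if x == 1:
--             return True
--         for i in range(2, x // 2 + 1):
--             if x % i == 0:
--                 return False
--         return True
--
--     def prime_factors(x):
--         if is_prime(x):
--             return [x]
--         result = []
--         for v in range(2, x // 2 + 1):
--             if not is_prime(v):
--                 continue
--             if n % v == 0:
--                 result.append(v)
--         return result
--
--     def min_index(l):
--         v = l[0]
--         i = 0
--         for i1, v1 in enumerate(l):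
--             if v1 < v:
--                 i = i1
--                 v = v1
--         return (i, v)
--
--     def max_index(l):
--         v = l[0]
--         i = 0
--         for i1, v1 in enumerate(l):
--             if v1 > v:
--                 i = i1
--                 v = v1
--         return (i, v)
--
--     all_primes = prime_factors(n)
--     result = [1 for i in range(dim)]
--     if n == 1:
--         return result
--     elif n == 2:
--         result[0] = n
--         return result
--     i = 0
--     n1 = n
--     for v in all_primes:
--         while n1 % v == 0:
--             result[i % dim] *= v
--             i += 1
--             n1 //= v
--     result = sorted(result, reverse=True)
--     for v in all_primes:
--         while True:
--             max_idx, max_val = max_index(result)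
--             min_idx, min_val = min_index(result)
--             if max_val > min_val * v and max_val % v == 0:
--                 result[max_idx] //= v
--                 result[min_idx] *= v
--             else:
--                 break
--     assert functools.reduce(lambda x, y: x * y, result) == n
--     return sorted(result, reverse=True)
-- ===== SOURCE B (Python) =====
-- def make_process_grid(n, dim):
--     # Factor n by trial division up to sqrt(n): flat = prime factors with
--     # multiplicity (ascending), primes = the distinct primes (ascending).
--     flat, primes = [], []
--     m, d = n, 2
--     while d * d <= m:
--         if m % d == 0:
--             primes.append(d)
--             while m % d == 0:
--                 flat.append(d)
--                 m //= d
--         d += 1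
--     if m > 1:
--         primes.append(m)
--         flat.append(m)
--     # Deal the prime factors round-robin over the dim slots.
--     slots = [1] * dim
--     for k, p in enumerate(flat):
--         slots[k % dim] *= p
--     # Rebalance: while the largest slot is divisible by p and still larger
--     # than p times the smallest, move one factor p from largest to smallest.
--     for p in primes:
--         while True:
--             slots.sort()
--             lo, hi = slots[0], slots[-1]
--             if hi > lo * p and hi % p == 0:
--                 slots[0] = lo * p
--                 slots[-1] = hi // p
--             else:
--                 break
--     return sorted(slots, reverse=True)
-- ===== Notes on version B (the rewrite author's own statement) =====
-- stated objective: faster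
-- what changed: A enumerates every candidate v up to n/2 and runs a full trial-division primality test on each to collect prime factors (and again inside is_prime), giving ~O(n^2/4) work; B factors n by a single trial-division sweep up to sqrt(n), deals the factors round-robin in one pass over the flat factor list, and rebalances on a kept-sorted list instead of rescanning for max/min indices.
-- outside the precondition, e.g. on make_process_grid(-4, 2): A returns [1, -4], B returns [1, 1]; on make_process_grid(1, 0): A returns [], B returns []
import Mathlib
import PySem

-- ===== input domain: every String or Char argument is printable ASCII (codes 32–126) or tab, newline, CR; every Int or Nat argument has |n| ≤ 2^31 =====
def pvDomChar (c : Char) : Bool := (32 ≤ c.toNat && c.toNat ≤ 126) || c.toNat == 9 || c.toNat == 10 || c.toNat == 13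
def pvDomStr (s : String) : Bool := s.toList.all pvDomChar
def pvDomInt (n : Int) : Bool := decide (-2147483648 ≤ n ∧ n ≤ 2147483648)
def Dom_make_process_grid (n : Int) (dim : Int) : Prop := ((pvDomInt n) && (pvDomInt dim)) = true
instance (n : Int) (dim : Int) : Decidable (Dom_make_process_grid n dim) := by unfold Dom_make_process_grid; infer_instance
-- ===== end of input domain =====

-- B re-implements A's grid factorisation with a single trial-division sweep up to sqrt(n)
-- (instead of enumerating and primality-testing every candidate up to n/2) and rebalances on a
-- kept-sorted list (instead of rescanning for max/min indices); objective: faster.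
-- A mutates no argument; the equivalence is about the return value.

-- ===== PORT A =====
-- is_prime: `for i in range(2, x//2+1): if x % i == 0: return False; return True`
def A_isPrime (x : Int) : Bool :=
  if x == 1 then true
  else (PySem.List.pyRange 2 (PySem.Int.floordiv x 2 + 1) 1).all (fun i => !(PySem.Int.mod x i == 0))

-- prime_factors (the Python closure tests `n % v`; it is only called with x = n)
def A_primeFactors (n x : Int) : List Int :=
  if A_isPrime x then [x]
  else (PySem.List.pyRange 2 (PySem.Int.floordiv x 2 + 1) 1).foldl
    (fun result v =>
      if !A_isPrime v then result
      else if PySem.Int.mod n v == 0 then result ++ [v] else result) []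

-- max_index / min_index: `v = l[0]; i = 0; for i1, v1 in enumerate(l): if v1 > v: i = i1; v = v1`
-- (l is never empty under Pre_; the getD default is never read there)
def A_maxIndex (l : List Int) : Nat × Int :=
  l.zipIdx.foldl (fun acc p => if p.1 > acc.2 then (p.2, p.1) else acc) (0, l.getD 0 0)

def A_minIndex (l : List Int) : Nat × Int :=
  l.zipIdx.foldl (fun acc p => if p.1 < acc.2 then (p.2, p.1) else acc) (0, l.getD 0 0)

-- `while n1 % v == 0: result[i % dim] *= v; i += 1; n1 //= v` ; state st = (result, i, n1).
-- The second guard conjunct only makes the recursion total: it holds whenever v ≥ 2 ∧ v ∣ n1 ∧ 1 ≤ n1,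
-- i.e. on every iteration Python actually runs under Pre_.  0 ≤ i % dim < dim, so set/getD are exact.
def A_divideOut (dim v : Int) (st : List Int × Int × Int) : List Int × Int × Int :=
  if h : PySem.Int.mod st.2.2 v == 0 ∧ (PySem.Int.floordiv st.2.2 v).toNat < st.2.2.toNat then
    let idx := (PySem.Int.mod st.2.1 dim).toNat
    A_divideOut dim v (st.1.set idx (st.1.getD idx 0 * v), st.2.1 + 1, PySem.Int.floordiv st.2.2 v)
  else st
termination_by st.2.2.toNat
decreasing_by exact h.2

-- `while True: ... if max_val > min_val * v and max_val % v == 0: move a factor v; else: break`.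
-- The last guard conjunct (the strictly decreasing sum) only makes the recursion total: under Pre_
-- every entry is ≥ 1 and it holds on every iteration Python runs (proved in balance_lockstep below).
def A_balance (v : Int) (result : List Int) : List Int :=
  let mx := A_maxIndex result
  let mn := A_minIndex result
  let next := (result.set mx.1 (PySem.Int.floordiv mx.2 v)).set mn.1 (mn.2 * v)
  if h : mx.2 > mn.2 * v ∧ PySem.Int.mod mx.2 v == 0 ∧ next.sum.toNat < result.sum.toNat then
    A_balance v next
  else result
termination_by result.sum.toNat
decreasing_by exact h.2.2

-- the `assert` always holds under Pre_ (the grid's product stays n throughout), so it is not ported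
def make_process_grid (n : Int) (dim : Int) : List Int :=
  let all_primes := A_primeFactors n n
  let result0 := (PySem.List.pyRange 0 dim 1).map (fun _ => (1 : Int))
  if n == 1 then result0
  else if n == 2 then result0.set 0 n  -- result[0] = n (IndexError for dim ≤ 0 is outside Pre_)
  else
    let st := all_primes.foldl (fun st v => A_divideOut dim v st) (result0, 0, n)
    let r1 := PySem.List.sorted st.1 (fun x => x) true
    let r2 := all_primes.foldl (fun r v => A_balance v r) r1
    PySem.List.sorted r2 (fun x => x) true

-- ===== PORT B =====
-- inner `while m % d == 0: flat.append(d); m //= d` (plus `primes.append(d)` handled by the caller);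
-- returns (appended factors, new m).  Guard as in A_divideOut: totality only.
def B_divide (m d : Int) : List Int × Int :=
  if h : PySem.Int.mod m d == 0 ∧ (PySem.Int.floordiv m d).toNat < m.toNat then
    let r := B_divide (PySem.Int.floordiv m d) d
    (d :: r.1, r.2)
  else ([], m)
termination_by m.toNat
decreasing_by exact h.2

-- `while d * d <= m: if m % d == 0: primes.append(d); <inner while>; d += 1` then
-- `if m > 1: primes.append(m); flat.append(m)`; returns (flat, primes).
-- The toNat guard conjuncts only make the recursion total (they hold on every iteration Python
-- runs: proved in B_divide_snd_toNat_lt / B_tdiv_spec below); branch selection is Python's.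
def B_tdiv (m d : Int) : List Int × List Int :=
  if h : (2 ≤ d ∧ d * d ≤ m) ∧ (m + 1 - (d + 1)).toNat < (m + 1 - d).toNat then
    if h2 : PySem.Int.mod m d == 0 ∧ (B_divide m d).2.toNat < m.toNat then
      let r := B_divide m d
      let rest := B_tdiv r.2 (d + 1)
      (r.1 ++ rest.1, d :: rest.2)
    else B_tdiv m (d + 1)
  else if 1 < m then ([m], [m]) else ([], [])
termination_by (m.toNat, (m + 1 - d).toNat)
decreasing_by
  · exact Prod.Lex.left _ _ h2.2
  · exact Prod.Lex.right _ h.2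

-- `while True: slots.sort(); lo, hi = slots[0], slots[-1]; if hi > lo*p and hi % p == 0: move; else: break`
-- (slots is never empty under Pre_, so slots[0] / slots[-1] are the getD reads; sum guard: totality only)
def B_balance (p : Int) (slots : List Int) : List Int :=
  let s := PySem.List.sorted slots (fun x => x) false
  let lo := s.getD 0 0
  let hi := s.getD (s.length - 1) 0
  let next := (s.set 0 (lo * p)).set (s.length - 1) (PySem.Int.floordiv hi p)
  if h : hi > lo * p ∧ PySem.Int.mod hi p == 0 ∧ next.sum.toNat < slots.sum.toNat then
    B_balance p next
  else s
termination_by slots.sum.toNat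
decreasing_by exact h.2.2

def make_process_grid_alt (n : Int) (dim : Int) : List Int :=
  let fp := B_tdiv n 2                       -- (flat, primes)
  let slots0 := PySem.List.pyRepeat [(1 : Int)] dim    -- [1] * dim
  let slots1 := fp.1.zipIdx.foldl (fun sl kp =>        -- for k, p in enumerate(flat): slots[k % dim] *= p
      let idx := (PySem.Int.mod (kp.2 : Int) dim).toNat
      sl.set idx (sl.getD idx 0 * kp.1)) slots0
  let slots2 := fp.2.foldl (fun sl p => B_balance p sl) slots1
  PySem.List.sorted slots2 (fun x => x) true

-- ===== PRECONDITION & SPEC =====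
-- Pre_ excludes n ≤ 0 — A raises ZeroDivisionError at n = 0, loops forever at n = -1, and for other
-- negative n returns a grid containing the negative n itself as if it were prime — and dim ≤ 0, on
-- which A raises IndexError or ZeroDivisionError for every n except n = 1 (where both return []).
def Pre_make_process_grid (n : Int) (dim : Int) : Prop := 1 ≤ n ∧ 1 ≤ dim
instance (n : Int) (dim : Int) : Decidable (Pre_make_process_grid n dim) := by
  unfold Pre_make_process_grid; infer_instance

def pvWitness_make_process_grid : Int × Int := (12, 3)

def Spec_make_process_grid (n : Int) (dim : Int) (out : List Int) : Prop := out = make_process_grid_alt n dim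
instance (n : Int) (dim : Int) (out : List Int) : Decidable (Spec_make_process_grid n dim out) := by
  unfold Spec_make_process_grid; infer_instance

-- ===== CLAIM (what is proved, stated in full; the proofs are below) =====
def Claim_equal_make_process_grid : Prop := ∀ (n : Int) (dim : Int), Dom_make_process_grid n dim → Pre_make_process_grid n dim → Spec_make_process_grid n dim (make_process_grid n dim)

-- ===== LEMMAS AND PROOFS =====

-- `q is a prime` phrased over Int exactly as both programs use it
def IsP (q : Int) : Prop := 2 ≤ q ∧ ∀ r : Int, 2 ≤ r → r ∣ q → r = q

-- trial-division invariant (TDInv): every divisor ≥ 2 of m is ≥ d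
def TDInv (m d : Int) : Prop := 1 ≤ m ∧ 2 ≤ d ∧ ∀ q : Int, 2 ≤ q → q ∣ m → d ≤ q

-- the round-robin multiply step shared by both phase-1 loops (B's literal fold step)
def B_step (dim : Int) (sl : List Int) (kp : Int × Nat) : List Int :=
  let idx := (PySem.Int.mod (kp.2 : Int) dim).toNat
  sl.set idx (sl.getD idx 0 * kp.1)

theorem isP_prime (q : Int) (h : IsP q) : Prime q := by
  have h2 : 2 ≤ q := h.1
  rw [Int.prime_iff_natAbs_prime, Nat.prime_def_lt]
  refine ⟨by omega, fun m hlt hdvd => ?_⟩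
  by_contra hm1
  have hm0 : m ≠ 0 := by
    rintro rfl
    have : q.natAbs = 0 := Nat.eq_zero_of_zero_dvd hdvd
    omega
  have hm2 : 2 ≤ m := by omega
  have hdvd' : (m : Int) ∣ q := by
    have hq : (m : Int) ∣ (q.natAbs : Int) := Int.natCast_dvd_natCast.mpr hdvd
    have he : (q.natAbs : Int) = q := by omega
    rwa [he] at hq
  have := h.2 m (by exact_mod_cast hm2) hdvd'
  omega

theorem proper_div_le_half (x r : Int) (hx : 2 ≤ x) (hr : 2 ≤ r) (hd : r ∣ x) (hne : r ≠ x) :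
    r ≤ PySem.Int.floordiv x 2 := by
  rw [PySem.Int.le_floordiv_iff_mul_le (by norm_num)]
  obtain ⟨t, ht⟩ := hd
  have ht1 : 1 ≤ t := by
    by_contra hle
    have : r * t ≤ 0 := mul_nonpos_of_nonneg_of_nonpos (by omega) (by omega)
    omega
  have ht2 : t ≠ 1 := fun h1 => hne (by rw [h1, mul_one] at ht; omega)
  have hge : 0 ≤ r * (t - 2) := mul_nonneg (by omega) (by omega)
  nlinarith

theorem isPrime_iff (x : Int) (hx : 2 ≤ x) : A_isPrime x = true ↔ IsP x := by
  unfold A_isPrime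
  rw [if_neg (by simp only [beq_iff_eq]; omega)]
  rw [List.all_eq_true]
  constructor
  · intro hall
    refine ⟨hx, fun r hr hdvd => ?_⟩
    by_contra hne
    have hle := proper_div_le_half x r hx hr hdvd hne
    have hmem : r ∈ PySem.List.pyRange 2 (PySem.Int.floordiv x 2 + 1) 1 :=
      PySem.List.mem_pyRange_one.mpr (by omega)
    have h := hall r hmem
    simp only [Bool.not_eq_eq_eq_not, Bool.not_true, beq_eq_false_iff_ne, ne_eq] at h
    exact h ((PySem.Int.mod_eq_zero_iff_dvd x r).mpr hdvd)
  · intro hP i hmem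
    rw [PySem.List.mem_pyRange_one] at hmem
    simp only [Bool.not_eq_eq_eq_not, Bool.not_true, beq_eq_false_iff_ne, ne_eq]
    intro hmod
    have hdvd : i ∣ x := (PySem.Int.mod_eq_zero_iff_dvd x i).mp hmod
    have hix := hP.2 i (by omega) hdvd
    subst hix
    have hle : i ≤ PySem.Int.floordiv i 2 := by omega
    rw [PySem.Int.le_floordiv_iff_mul_le (by norm_num)] at hle
    omega

theorem B_divide_snd_toNat_le (m d : Int) : (B_divide m d).2.toNat ≤ m.toNat := by
  fun_induction B_divide m d with
  | case1 m h r ih => exact le_trans ih (le_of_lt h.2)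
  | case2 m h => simp

theorem B_divide_snd_toNat_lt (m d : Int) (h1 : PySem.Int.mod m d == 0) (h2 : 2 ≤ d)
    (h3 : d * d ≤ m) : (B_divide m d).2.toNat < m.toNat := by
  have hm : (4:Int) ≤ m := le_trans (by nlinarith) h3
  have hfl : PySem.Int.floordiv m d = m / d := PySem.Int.floordiv_eq_ediv_of_pos (by omega)
  have hde := Int.mul_ediv_add_emod m d
  have hr1 := Int.emod_nonneg m (by omega : d ≠ 0)
  have hr2 := Int.emod_lt_of_pos m (by omega : 0 < d)
  have hnn : 0 ≤ m / d := Int.ediv_nonneg (by omega) (by omega)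
  have hlt : m / d < m := by nlinarith
  have hg : (PySem.Int.floordiv m d).toNat < m.toNat := by rw [hfl]; omega
  rw [B_divide]
  simp only [h1, true_and, hg]
  exact lt_of_le_of_lt (by simpa [hfl] using B_divide_snd_toNat_le (m/d) d) hg

theorem B_tdiv_lexgoal (m d : Int) (h2 : 2 ≤ d) (h3 : d * d ≤ m) :
    (m + 1 - (d + 1)).toNat < (m + 1 - d).toNat := by
  have h2d : 2 * d ≤ d * d := mul_le_mul_of_nonneg_right (by omega) (by omega)
  omega

theorem floordiv_facts (m d : Int) (hm : 1 ≤ m) (hd : 2 ≤ d) (hdvd : d ∣ m) :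
    1 ≤ PySem.Int.floordiv m d ∧ (PySem.Int.floordiv m d).toNat < m.toNat ∧
    PySem.Int.floordiv m d ∣ m ∧ m = d * PySem.Int.floordiv m d := by
  have hfl : PySem.Int.floordiv m d = m / d := PySem.Int.floordiv_eq_ediv_of_pos (by omega)
  have hmd : d ≤ m := Int.le_of_dvd (by omega) hdvd
  have hde := Int.mul_ediv_add_emod m d
  have hz : m % d = 0 := Int.emod_eq_zero_of_dvd hdvd
  have heq : m = d * PySem.Int.floordiv m d := by rw [hfl]; omega
  have hq1 : 1 ≤ PySem.Int.floordiv m d := by rw [hfl]; nlinarith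
  have h2q : 2 * PySem.Int.floordiv m d ≤ d * PySem.Int.floordiv m d :=
    mul_le_mul_of_nonneg_right (by omega) (by omega)
  exact ⟨hq1, by omega, ⟨d, by rw [mul_comm]; exact heq⟩, heq⟩

theorem B_divide_spec (d : Int) (hP : IsP d) : ∀ m : Int, 1 ≤ m →
    (∀ x ∈ (B_divide m d).1, x = d) ∧ 1 ≤ (B_divide m d).2 ∧ ¬ d ∣ (B_divide m d).2 ∧
    (B_divide m d).2 ∣ m ∧ (∀ q : Int, IsP q → q ≠ d → (q ∣ m ↔ q ∣ (B_divide m d).2)) := by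
  have hd2 : 2 ≤ d := hP.1
  intro m
  fun_induction B_divide m d with
  | case1 m h r ih =>
    intro hm
    have hdvd : d ∣ m := (PySem.Int.mod_eq_zero_iff_dvd m d).mp (by
      have := h.1; exact beq_iff_eq.mp this)
    obtain ⟨hq1, _, hqdvd, heq⟩ := floordiv_facts m d hm hd2 hdvd
    obtain ⟨ihall, ihone, ihnd, ihdvd, ihiff⟩ := ih hq1
    refine ⟨?_, ihone, ihnd, ihdvd.trans hqdvd, ?_⟩
    · intro x hx
      rcases List.mem_cons.mp hx with rfl | hx'
      · rfl
      · exact ihall x hx'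
    · intro q hq hqd
      rw [← ihiff q hq hqd]
      constructor
      · intro hqm
        rcases (isP_prime q hq).2.2 d (PySem.Int.floordiv m d) (heq ▸ hqm) with hcase | hcase
        · exact absurd (hP.2 q hq.1 hcase) hqd
        · exact hcase
      · intro hqf
        exact hqf.trans hqdvd
  | case2 m h =>
    intro hm
    refine ⟨by simp, hm, ?_, dvd_rfl, fun q _ _ => Iff.rfl⟩
    intro hdvd
    obtain ⟨_, hlt, _, _⟩ := floordiv_facts m d hm hd2 hdvd
    exact h ⟨beq_iff_eq.mpr ((PySem.Int.mod_eq_zero_iff_dvd m d).mpr hdvd), hlt⟩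

theorem B_tdiv_spec (m d : Int) : TDInv m d →
    (∀ q : Int, q ∈ (B_tdiv m d).2 ↔ IsP q ∧ q ∣ m) ∧
    (B_tdiv m d).2.Pairwise (· < ·) ∧ (∀ q ∈ (B_tdiv m d).2, d ≤ q) ∧
    (∀ x ∈ (B_tdiv m d).1, 2 ≤ x) := by
  fun_induction B_tdiv m d with
  | case1 m d h h2 r rest ih =>
    intro hInv
    have hdvd : d ∣ m := (PySem.Int.mod_eq_zero_iff_dvd m d).mp (beq_iff_eq.mp h2.1)
    have hPd : IsP d := ⟨h.1.1, fun rr hrr hrd =>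
      le_antisymm (Int.le_of_dvd (by omega) hrd) (hInv.2.2 rr hrr (hrd.trans hdvd))⟩
    obtain ⟨hall, hone, hnd, hdvd', hiff⟩ := B_divide_spec d hPd m hInv.1
    have hInv' : TDInv r.2 (d + 1) := by
      refine ⟨hone, by omega, fun q hq hqd => ?_⟩
      have hge := hInv.2.2 q hq (hqd.trans hdvd')
      have hne : q ≠ d := fun hqe => hnd (by rw [hqe] at hqd; exact hqd)
      omega
    obtain ⟨ihmem, ihpw, ihge, ihflat⟩ := ih hInv'
    refine ⟨?_, ?_, ?_, ?_⟩
    · intro q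
      constructor
      · intro hq
        rcases List.mem_cons.mp hq with rfl | hq'
        · exact ⟨hPd, hdvd⟩
        · obtain ⟨h1, h2'⟩ := (ihmem q).mp hq'
          exact ⟨h1, h2'.trans hdvd'⟩
      · rintro ⟨hq, hqm⟩
        by_cases hne : q = d
        · exact hne ▸ List.mem_cons_self
        · exact List.mem_cons_of_mem _ ((ihmem q).mpr ⟨hq, (hiff q hq hne).mp hqm⟩)
    · exact List.pairwise_cons.mpr ⟨fun q hq => by have := ihge q hq; omega, ihpw⟩
    · intro q hq
      rcases List.mem_cons.mp hq with rfl | hq'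
      · exact le_refl _
      · have := ihge q hq'; omega
    · intro x hx
      rcases List.mem_append.mp hx with hx' | hx'
      · have := hall x hx'; omega
      · exact ihflat x hx'
  | case2 m d h h2 ih =>
    intro hInv
    have hInv' : TDInv m (d + 1) := by
      refine ⟨hInv.1, by have := hInv.2.1; omega, fun q hq hqd => ?_⟩
      have hge := hInv.2.2 q hq hqd
      have hne : q ≠ d := by
        intro hqe
        have hbe : (PySem.Int.mod m d == 0) = true := beq_iff_eq.mpr
          ((PySem.Int.mod_eq_zero_iff_dvd m d).mpr (hqe ▸ hqd))
        exact h2 ⟨hbe, B_divide_snd_toNat_lt m d hbe h.1.1 h.1.2⟩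
      omega
    obtain ⟨ihmem, ihpw, ihge, ihflat⟩ := ih hInv'
    exact ⟨ihmem, ihpw, fun q hq => by have := ihge q hq; omega, ihflat⟩
  | case3 m d h hm =>
    intro hInv
    have hd2 : 2 ≤ d := hInv.2.1
    have hsq : m < d * d := by
      by_contra hge
      have hge' : d * d ≤ m := by omega
      exact h ⟨⟨hd2, hge'⟩, B_tdiv_lexgoal m d hd2 hge'⟩
    have hkey : ∀ r : Int, 2 ≤ r → r ∣ m → r = m := by
      intro r hr hrd
      obtain ⟨c, hc⟩ := hrd
      have hc1 : 1 ≤ c := by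
        by_contra hle
        have : r * c ≤ 0 := mul_nonpos_of_nonneg_of_nonpos (by omega) (by omega)
        omega
      by_cases hc2 : c = 1
      · rw [hc2, mul_one] at hc; omega
      · exfalso
        have hcd : c ∣ m := ⟨r, by rw [hc]; ring⟩
        have hcge := hInv.2.2 c (by omega) hcd
        have hrge := hInv.2.2 r hr ⟨c, hc⟩
        have : d * d ≤ r * c := mul_le_mul hrge hcge (by omega) (by omega)
        omega
    have hPm : IsP m := ⟨by omega, hkey⟩
    refine ⟨?_, by simp, ?_, ?_⟩
    · intro q
      simp only [List.mem_singleton]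
      constructor
      · rintro rfl; exact ⟨hPm, dvd_rfl⟩
      · rintro ⟨hq, hqm⟩; exact hkey q hq.1 hqm
    · intro q hq
      rw [List.mem_singleton] at hq
      rw [hq]
      exact hInv.2.2 m (by omega) dvd_rfl
    · intro x hx
      rw [List.mem_singleton] at hx
      omega
  | case4 m d h hm =>
    intro hInv
    have hm1 : m = 1 := by have := hInv.1; omega
    refine ⟨?_, by simp, by simp, by simp⟩
    intro q
    simp only [List.not_mem_nil, false_iff, not_and]
    intro hq hqm
    have := Int.le_of_dvd (by omega) (hm1 ▸ hqm)
    have := hq.1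
    omega

theorem eq_of_mem_iff_pairwise_lt (l1 l2 : List Int) (h1 : l1.Pairwise (· < ·))
    (h2 : l2.Pairwise (· < ·)) (hm : ∀ x, x ∈ l1 ↔ x ∈ l2) : l1 = l2 := by
  have hperm := (List.perm_ext_iff_of_nodup (h1.imp ne_of_lt) (h2.imp ne_of_lt)).mpr hm
  exact List.eq_of_perm_of_sorted (fun a b _ _ hab hba => le_antisymm hab hba)
    (h1.imp le_of_lt) (h2.imp le_of_lt) hperm

theorem A_primeFactors_eq (n : Int) (hn : 2 ≤ n) : A_primeFactors n n = (B_tdiv n 2).2 := by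
  have hInv : TDInv n 2 := ⟨by omega, by omega, fun q hq _ => hq⟩
  obtain ⟨hmem, hpw, hge, _⟩ := B_tdiv_spec n 2 hInv
  unfold A_primeFactors
  by_cases hp : A_isPrime n = true
  · rw [if_pos hp]
    have hPn : IsP n := (isPrime_iff n hn).mp hp
    apply eq_of_mem_iff_pairwise_lt _ _ (by simp) hpw
    intro x
    rw [List.mem_singleton, hmem x]
    constructor
    · rintro rfl; exact ⟨hPn, dvd_rfl⟩
    · rintro ⟨hq, hqm⟩; exact hPn.2 x hq.1 hqm
  · rw [if_neg hp]
    have hstep : (fun (result : List Int) v =>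
        if (!A_isPrime v) = true then result
        else if (PySem.Int.mod n v == 0) = true then result ++ [v] else result)
        = (fun result v =>
            if (A_isPrime v && (PySem.Int.mod n v == 0)) = true then result ++ [v] else result) := by
      funext acc v
      cases hA : A_isPrime v <;> cases hM : (PySem.Int.mod n v == 0) <;> simp [hA, hM]
    rw [hstep, PySem.List.foldl_append_if_eq_filter, List.nil_append]
    refine eq_of_mem_iff_pairwise_lt _ _ ?_ hpw ?_
    · exact List.Pairwise.filter _
        (PySem.List.pairwise_lt_pyRange_one 2 (PySem.Int.floordiv n 2 + 1))
    intro x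
    rw [List.mem_filter, PySem.List.mem_pyRange_one, hmem x]
    constructor
    · rintro ⟨⟨hx2, hxlt⟩, hpx⟩
      obtain ⟨hA, hM⟩ := Bool.and_eq_true_iff.mp hpx
      exact ⟨(isPrime_iff x hx2).mp hA, (PySem.Int.mod_eq_zero_iff_dvd n x).mp (beq_iff_eq.mp hM)⟩
    · rintro ⟨hq, hqm⟩
      have hx2 : 2 ≤ x := hq.1
      have hne : x ≠ n := fun hxe => hp ((isPrime_iff n hn).mpr (hxe ▸ hq))
      have hle := proper_div_le_half n x hn hx2 hqm hne
      refine ⟨⟨hx2, by omega⟩, Bool.and_eq_true_iff.mpr ⟨(isPrime_iff x hx2).mpr hq,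
        beq_iff_eq.mpr ((PySem.Int.mod_eq_zero_iff_dvd n x).mpr hqm)⟩⟩

theorem A_divideOut_eq (dim v : Int) : ∀ (N : Nat) (m : Int), m.toNat ≤ N →
    ∀ (res : List Int) (i : Int), 0 ≤ i →
    A_divideOut dim v (res, i, m) =
      (((B_divide m v).1.zipIdx i.toNat).foldl (B_step dim) res,
       i + (B_divide m v).1.length, (B_divide m v).2) := by
  intro N
  induction N with
  | zero =>
    intro m hm res i hi
    have hg : ¬ ((PySem.Int.mod m v == 0) = true ∧ (PySem.Int.floordiv m v).toNat < m.toNat) := by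
      rintro ⟨-, hlt⟩; omega
    rw [A_divideOut, B_divide]
    dsimp only
    rw [dif_neg hg, dif_neg hg]
    simp
  | succ N ih =>
    intro m hm res i hi
    by_cases hg : ((PySem.Int.mod m v == 0) = true ∧ (PySem.Int.floordiv m v).toNat < m.toNat)
    · rw [A_divideOut, B_divide]
      dsimp only
      rw [dif_pos hg, dif_pos hg]
      rw [ih (PySem.Int.floordiv m v) (by omega) _ (i + 1) (by omega)]
      dsimp only
      rw [List.zipIdx_cons, List.foldl_cons]
      have hcast : ((i.toNat : Int)) = i := Int.toNat_of_nonneg hi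
      have ht : (i + 1).toNat = i.toNat + 1 := by omega
      rw [ht]
      simp only [B_step, hcast, List.length_cons]
      refine Prod.ext rfl (Prod.ext ?_ rfl)
      push_cast
      ring
    · rw [A_divideOut, B_divide]
      dsimp only
      rw [dif_neg hg, dif_neg hg]
      simp

theorem IsP_of_dvd_inv (m d : Int) (hInv : TDInv m d) (hdvd : d ∣ m) : IsP d :=
  ⟨hInv.2.1, fun rr hrr hrd =>
    le_antisymm (Int.le_of_dvd (by have := hInv.2.1; omega) hrd)
      (hInv.2.2 rr hrr (hrd.trans hdvd))⟩

theorem TDInv_step (m d : Int) (hInv : TDInv m d) (hdvd : d ∣ m) :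
    TDInv (B_divide m d).2 (d + 1) := by
  obtain ⟨hall, hone, hnd, hdvd', hiff⟩ :=
    B_divide_spec d (IsP_of_dvd_inv m d hInv hdvd) m hInv.1
  refine ⟨hone, by have := hInv.2.1; omega, fun q hq hqd => ?_⟩
  have hge := hInv.2.2 q hq (hqd.trans hdvd')
  have hne : q ≠ d := fun hqe => hnd (by rw [hqe] at hqd; exact hqd)
  omega

theorem phase1_eq (dim : Int) : ∀ (m d : Int), TDInv m d → ∀ (res : List Int) (i : Int), 0 ≤ i →
    (B_tdiv m d).2.foldl (fun st v => A_divideOut dim v st) (res, i, m) =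
      (((B_tdiv m d).1.zipIdx i.toNat).foldl (B_step dim) res,
       i + (B_tdiv m d).1.length, 1) := by
  intro m d
  fun_induction B_tdiv m d with
  | case1 m d h h2 r rest ih =>
    intro hInv res i hi
    have hdvd : d ∣ m := (PySem.Int.mod_eq_zero_iff_dvd m d).mp (beq_iff_eq.mp h2.1)
    have hInv' : TDInv r.2 (d + 1) := TDInv_step m d hInv hdvd
    rw [List.foldl_cons]
    rw [A_divideOut_eq dim d m.toNat m (le_refl _) res i hi]
    rw [ih hInv' _ (i + (B_divide m d).1.length) (by omega)]
    dsimp only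
    rw [List.zipIdx_append, List.foldl_append]
    have ht : (i + ((B_divide m d).1.length : Int)).toNat
        = i.toNat + (B_divide m d).1.length := by omega
    rw [ht]
    refine Prod.ext rfl (Prod.ext ?_ rfl)
    simp only [List.length_append]
    push_cast
    ring
  | case2 m d h h2 ih =>
    intro hInv res i hi
    have hInv' : TDInv m (d + 1) := by
      refine ⟨hInv.1, by have := hInv.2.1; omega, fun q hq hqd => ?_⟩
      have hge := hInv.2.2 q hq hqd
      have hne : q ≠ d := by
        intro hqe
        have hbe : (PySem.Int.mod m d == 0) = true := beq_iff_eq.mpr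
          ((PySem.Int.mod_eq_zero_iff_dvd m d).mpr (hqe ▸ hqd))
        exact h2 ⟨hbe, B_divide_snd_toNat_lt m d hbe h.1.1 h.1.2⟩
      omega
    exact ih hInv' res i hi
  | case3 m d h hm =>
    intro hInv res i hi
    have hfd : PySem.Int.floordiv m m = 1 := by
      rw [PySem.Int.floordiv_eq_ediv_of_pos (by omega)]
      exact Int.ediv_self (by omega)
    have hmod0 : (PySem.Int.mod m m == 0) = true :=
      beq_iff_eq.mpr ((PySem.Int.mod_eq_zero_iff_dvd m m).mpr dvd_rfl)
    have hB1 : B_divide 1 m = ([], 1) := by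
      rw [B_divide]
      rw [dif_neg]
      rintro ⟨hbe, -⟩
      have h1 : PySem.Int.mod 1 m = 1 := by
        rw [PySem.Int.mod_eq_emod_of_pos (by omega)]
        exact Int.emod_eq_of_lt (by omega) (by omega)
      rw [h1] at hbe
      exact absurd (beq_iff_eq.mp hbe) (by omega)
    have hBmm : B_divide m m = ([m], 1) := by
      rw [B_divide]
      rw [dif_pos ⟨hmod0, by rw [hfd]; omega⟩]
      rw [hfd, hB1]
    rw [List.foldl_cons, List.foldl_nil]
    rw [A_divideOut_eq dim m m.toNat m (le_refl _) res i hi]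
    rw [hBmm]
  | case4 m d h hm =>
    intro hInv res i hi
    have hm1 : m = 1 := by have := hInv.1; omega
    subst hm1
    simp

def maxFoldF : Nat × Int → Int × Nat → Nat × Int :=
  fun acc p => if p.1 > acc.2 then (p.2, p.1) else acc

def minFoldF : Nat × Int → Int × Nat → Nat × Int :=
  fun acc p => if p.1 < acc.2 then (p.2, p.1) else acc

theorem maxFold_spec : ∀ (t : List Int) (off : Nat) (acc : Nat × Int),
    (((t.zipIdx off).foldl maxFoldF acc) = acc ∨
      ∃ k, ∃ _ : k < t.length, ((t.zipIdx off).foldl maxFoldF acc).1 = off + k ∧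
        t[k] = ((t.zipIdx off).foldl maxFoldF acc).2) ∧
    acc.2 ≤ ((t.zipIdx off).foldl maxFoldF acc).2 ∧
    (∀ y ∈ t, y ≤ ((t.zipIdx off).foldl maxFoldF acc).2) := by
  intro t
  induction t with
  | nil => intro off acc; simp
  | cons x t ih =>
    intro off acc
    rw [List.zipIdx_cons, List.foldl_cons]
    obtain ⟨hdis, hacc, hbound⟩ := ih (off + 1) (maxFoldF acc (x, off))
    have hstep : acc.2 ≤ (maxFoldF acc (x, off)).2 := by
      by_cases hgt : x > acc.2
      · simp only [maxFoldF, if_pos hgt]; omega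
      · simp only [maxFoldF, if_neg hgt]; exact le_refl _
    have hxle : x ≤ (maxFoldF acc (x, off)).2 := by
      by_cases hgt : x > acc.2
      · simp only [maxFoldF, if_pos hgt]; exact le_refl _
      · simp only [maxFoldF, if_neg hgt]; omega
    refine ⟨?_, le_trans hstep hacc, ?_⟩
    · rcases hdis with heq | ⟨k, hk, h1, h2⟩
      · by_cases hgt : x > acc.2
        · right
          refine ⟨0, by simp, ?_, ?_⟩
          · rw [heq]; simp [maxFoldF, hgt]
          · rw [heq]; simp [maxFoldF, hgt]
        · left; rw [heq]; simp [maxFoldF, hgt]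
      · right
        refine ⟨k + 1, by simpa using hk, by rw [h1]; omega, by simpa using h2⟩
    · intro y hy
      rcases List.mem_cons.mp hy with rfl | hyt
      · exact le_trans hxle hacc
      · exact hbound y hyt

theorem maxIndex_spec (l : List Int) (hne : l ≠ []) :
    (A_maxIndex l).1 < l.length ∧ l.getD (A_maxIndex l).1 0 = (A_maxIndex l).2 ∧
    ∀ y ∈ l, y ≤ (A_maxIndex l).2 := by
  have h0 : 0 < l.length := List.length_pos_iff.mpr hne
  have hA : A_maxIndex l = (l.zipIdx 0).foldl maxFoldF (0, l.getD 0 0) := rfl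
  obtain ⟨hdis, -, hbound⟩ := maxFold_spec l 0 (0, l.getD 0 0)
  rw [hA]
  refine ⟨?_, ?_, hbound⟩
  · rcases hdis with heq | ⟨k, hk, h1, -⟩
    · rw [heq]; exact h0
    · rw [h1]; omega
  · rcases hdis with heq | ⟨k, hk, h1, h2⟩
    · rw [heq]
    · rw [h1]
      simp only [Nat.zero_add]
      rw [List.getD_eq_getElem l 0 hk]
      exact h2

theorem minFold_spec : ∀ (t : List Int) (off : Nat) (acc : Nat × Int),
    (((t.zipIdx off).foldl minFoldF acc) = acc ∨
      ∃ k, ∃ _ : k < t.length, ((t.zipIdx off).foldl minFoldF acc).1 = off + k ∧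
        t[k] = ((t.zipIdx off).foldl minFoldF acc).2) ∧
    ((t.zipIdx off).foldl minFoldF acc).2 ≤ acc.2 ∧
    (∀ y ∈ t, ((t.zipIdx off).foldl minFoldF acc).2 ≤ y) := by
  intro t
  induction t with
  | nil => intro off acc; simp
  | cons x t ih =>
    intro off acc
    rw [List.zipIdx_cons, List.foldl_cons]
    obtain ⟨hdis, hacc, hbound⟩ := ih (off + 1) (minFoldF acc (x, off))
    have hstep : (minFoldF acc (x, off)).2 ≤ acc.2 := by
      by_cases hgt : x < acc.2
      · simp only [minFoldF, if_pos hgt]; omega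
      · simp only [minFoldF, if_neg hgt]; exact le_refl _
    have hxle : (minFoldF acc (x, off)).2 ≤ x := by
      by_cases hgt : x < acc.2
      · simp only [minFoldF, if_pos hgt]; exact le_refl _
      · simp only [minFoldF, if_neg hgt]; omega
    refine ⟨?_, le_trans hacc hstep, ?_⟩
    · rcases hdis with heq | ⟨k, hk, h1, h2⟩
      · by_cases hgt : x < acc.2
        · right
          refine ⟨0, by simp, ?_, ?_⟩
          · rw [heq]; simp [minFoldF, hgt]
          · rw [heq]; simp [minFoldF, hgt]
        · left; rw [heq]; simp [minFoldF, hgt]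
      · right
        refine ⟨k + 1, by simpa using hk, by rw [h1]; omega, by simpa using h2⟩
    · intro y hy
      rcases List.mem_cons.mp hy with rfl | hyt
      · exact le_trans hacc hxle
      · exact hbound y hyt

theorem minIndex_spec (l : List Int) (hne : l ≠ []) :
    (A_minIndex l).1 < l.length ∧ l.getD (A_minIndex l).1 0 = (A_minIndex l).2 ∧
    ∀ y ∈ l, (A_minIndex l).2 ≤ y := by
  have h0 : 0 < l.length := List.length_pos_iff.mpr hne
  have hA : A_minIndex l = (l.zipIdx 0).foldl minFoldF (0, l.getD 0 0) := rfl
  obtain ⟨hdis, -, hbound⟩ := minFold_spec l 0 (0, l.getD 0 0)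
  rw [hA]
  refine ⟨?_, ?_, hbound⟩
  · rcases hdis with heq | ⟨k, hk, h1, -⟩
    · rw [heq]; exact h0
    · rw [h1]; omega
  · rcases hdis with heq | ⟨k, hk, h1, h2⟩
    · rw [heq]
    · rw [h1]
      simp only [Nat.zero_add]
      rw [List.getD_eq_getElem l 0 hk]
      exact h2

theorem set_perm (l : List Int) : ∀ (i : Nat) (h : i < l.length) (a : Int),
    ((l.set i a) ++ [l[i]]).Perm (l ++ [a]) := by
  induction l with
  | nil => intro i h; simp at h
  | cons x t ih =>
    intro i h a
    cases i with
    | zero =>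
      simp only [List.set, List.getElem_cons_zero, List.cons_append]
      refine ((List.perm_append_singleton x t).cons a).trans ?_
      refine (List.Perm.swap x a t).trans ?_
      exact ((List.perm_append_singleton a t).symm).cons x
    | succ j =>
      simp only [List.set, List.getElem_cons_succ, List.cons_append]
      exact (ih j (by simpa using h) a).cons x

theorem set_multiset (l : List Int) (i : Nat) (h : i < l.length) (a : Int) :
    (↑(l.set i a) : Multiset Int) + {l[i]} = ↑l + {a} := by
  have hp := set_perm l i h a
  calc (↑(l.set i a) : Multiset Int) + {l[i]} = ↑((l.set i a) ++ [l[i]]) := by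
        rw [← Multiset.coe_singleton, ← Multiset.coe_add]
    _ = ↑(l ++ [a]) := Multiset.coe_eq_coe.mpr hp
    _ = ↑l + {a} := by rw [← Multiset.coe_singleton, ← Multiset.coe_add]

theorem setset_multiset (l : List Int) (i j : Nat) (hi : i < l.length) (hj : j < l.length)
    (hij : i ≠ j) (a b : Int) :
    (↑((l.set i a).set j b) : Multiset Int) + {l[i], l[j]} = ↑l + {a, b} := by
  have hj' : j < (l.set i a).length := by simpa using hj
  have h1 := set_multiset (l.set i a) j hj' b
  rw [List.getElem_set_ne hij] at h1
  have h2 := set_multiset l i hi a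
  have e1 : ({l[i], l[j]} : Multiset Int) = {l[j]} + {l[i]} := by
    simp only [Multiset.insert_eq_cons, ← Multiset.singleton_add]
    exact add_comm _ _
  have e2 : ({a, b} : Multiset Int) = {a} + {b} := by
    simp only [Multiset.insert_eq_cons, ← Multiset.singleton_add]
  calc (↑((l.set i a).set j b) : Multiset Int) + {l[i], l[j]}
      = ((↑((l.set i a).set j b) : Multiset Int) + {l[j]}) + {l[i]} := by rw [e1, add_assoc]
    _ = (↑(l.set i a) + ({b} : Multiset Int)) + {l[i]} := by rw [h1]
    _ = ((↑(l.set i a) : Multiset Int) + {l[i]}) + {b} := by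
        rw [add_assoc, add_assoc, add_comm ({b} : Multiset Int) _]
    _ = (↑l + ({a} : Multiset Int)) + {b} := by rw [h2]
    _ = ↑l + {a, b} := by rw [e2, add_assoc]

theorem one_le_sum (l : List Int) (h : ∀ x ∈ l, 1 ≤ x) : 0 ≤ l.sum ∧ (l ≠ [] → 1 ≤ l.sum) := by
  induction l with
  | nil => simp
  | cons x t ih =>
    have hx := h x (by simp)
    have ht := ih (fun y hy => h y (by simp [hy]))
    simp only [List.sum_cons]
    constructor
    · omega
    · intro _; omega

theorem pairwise_le_getD_zero (s : List Int) (hs : s.Pairwise (· ≤ ·)) :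
    ∀ y ∈ s, s.getD 0 0 ≤ y := by
  cases s with
  | nil => simp
  | cons x t =>
    intro y hy
    rcases List.mem_cons.mp hy with rfl | hyt
    · simp
    · simpa using (List.pairwise_cons.mp hs).1 y hyt

theorem pairwise_le_getD_last (s : List Int) (hs : s.Pairwise (· ≤ ·)) :
    ∀ y ∈ s, y ≤ s.getD (s.length - 1) 0 := by
  intro y hy
  obtain ⟨k, hk, hky⟩ := List.mem_iff_getElem.mp hy
  have hlen : 0 < s.length := by omega
  have hlast : s.length - 1 < s.length := by omega
  rw [List.getD_eq_getElem s 0 hlast]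
  rcases Nat.lt_or_ge k (s.length - 1) with hlt | hge
  · have := List.pairwise_iff_getElem.mp hs k (s.length - 1) hk hlast hlt
    omega
  · have : k = s.length - 1 := by omega
    subst this; omega

theorem balance_lockstep (p : Int) (hp : 2 ≤ p) : ∀ (N : Nat) (la lb : List Int),
    la.sum.toNat ≤ N → la.Perm lb → la ≠ [] → (∀ x ∈ la, 1 ≤ x) →
    (A_balance p la).Perm (B_balance p lb) ∧ (∀ x ∈ A_balance p la, 1 ≤ x) := by
  intro N
  induction N with
  | zero =>
    intro la lb hN hperm hne hone
    have h1 := (one_le_sum la hone).2 hne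
    exact absurd hN (by omega)
  | succ N ih =>
    intro la lb hN hperm hne hone
    obtain ⟨hmi, hmg, hmb⟩ := maxIndex_spec la hne
    obtain ⟨hni, hng, hnb⟩ := minIndex_spec la hne
    have hMXmem : (A_maxIndex la).2 ∈ la := by
      rw [← hmg, List.getD_eq_getElem la 0 hmi]; exact List.getElem_mem hmi
    have hMNmem : (A_minIndex la).2 ∈ la := by
      rw [← hng, List.getD_eq_getElem la 0 hni]; exact List.getElem_mem hni
    have hsperm : (PySem.List.sorted lb (fun x => x) false).Perm lb :=
      PySem.List.sorted_perm lb (fun x => x) false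
    have hslen : (PySem.List.sorted lb (fun x => x) false).length = la.length := by
      rw [hsperm.length_eq, hperm.length_eq]
    have hs0 : 0 < (PySem.List.sorted lb (fun x => x) false).length := by
      rw [hslen]; exact List.length_pos_iff.mpr hne
    have hspw : (PySem.List.sorted lb (fun x => x) false).Pairwise (· ≤ ·) :=
      (PySem.List.sorted_pairwise lb (fun x => x)).imp (fun hab => hab)
    have hlomem : (PySem.List.sorted lb (fun x => x) false).getD 0 0
        ∈ (PySem.List.sorted lb (fun x => x) false) := by
      rw [List.getD_eq_getElem _ 0 hs0]; exact List.getElem_mem hs0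
    have hsl : (PySem.List.sorted lb (fun x => x) false).length - 1
        < (PySem.List.sorted lb (fun x => x) false).length := by omega
    have hhimem : (PySem.List.sorted lb (fun x => x) false).getD
        ((PySem.List.sorted lb (fun x => x) false).length - 1) 0
        ∈ (PySem.List.sorted lb (fun x => x) false) := by
      rw [List.getD_eq_getElem _ 0 hsl]; exact List.getElem_mem hsl
    have hmemiff : ∀ y : Int, y ∈ (PySem.List.sorted lb (fun x => x) false) ↔ y ∈ la :=
      fun y => (hsperm.mem_iff).trans (hperm.mem_iff).symm
    have hlo : (PySem.List.sorted lb (fun x => x) false).getD 0 0 = (A_minIndex la).2 := by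
      apply le_antisymm
      · exact pairwise_le_getD_zero _ hspw _ ((hmemiff _).mpr hMNmem)
      · exact hnb _ ((hmemiff _).mp hlomem)
    have hhi : (PySem.List.sorted lb (fun x => x) false).getD
        ((PySem.List.sorted lb (fun x => x) false).length - 1) 0 = (A_maxIndex la).2 := by
      apply le_antisymm
      · exact hmb _ ((hmemiff _).mp hhimem)
      · exact pairwise_le_getD_last _ hspw _ ((hmemiff _).mpr hMXmem)
    by_cases hc : (A_maxIndex la).2 > (A_minIndex la).2 * p ∧
        PySem.Int.mod (A_maxIndex la).2 p = 0
    · -- the loop moves a factor p on both sides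
      obtain ⟨hgt, hmod⟩ := hc
      have hMN1 : 1 ≤ (A_minIndex la).2 := hone _ hMNmem
      have hdvd : p ∣ (A_maxIndex la).2 := (PySem.Int.mod_eq_zero_iff_dvd _ _).mp hmod
      have hfl : PySem.Int.floordiv (A_maxIndex la).2 p = (A_maxIndex la).2 / p :=
        PySem.Int.floordiv_eq_ediv_of_pos (by omega)
      have hQp : PySem.Int.floordiv (A_maxIndex la).2 p * p = (A_maxIndex la).2 := by
        rw [hfl]; exact Int.ediv_mul_cancel hdvd
      have hQgt : (A_minIndex la).2 < PySem.Int.floordiv (A_maxIndex la).2 p := by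
        have hmul : (A_minIndex la).2 * p < PySem.Int.floordiv (A_maxIndex la).2 p * p := by
          rw [hQp]; exact hgt
        exact lt_of_mul_lt_mul_right (by omega) (by omega)
      have hQ1 : 1 ≤ PySem.Int.floordiv (A_maxIndex la).2 p := by omega
      have hMXgtMN : (A_minIndex la).2 < (A_maxIndex la).2 := by nlinarith
      have hij : (A_maxIndex la).1 ≠ (A_minIndex la).1 := by
        intro he
        rw [he, hng] at hmg
        omega
      have hlen2 : 2 ≤ la.length := by
        rcases Nat.lt_or_ge la.length 2 with hl | hl
        · exfalso; apply hij; omega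
        · exact hl
      have hEI : la[(A_maxIndex la).1]'hmi = (A_maxIndex la).2 := by
        rw [← List.getD_eq_getElem la 0 hmi]; exact hmg
      have hEJ : la[(A_minIndex la).1]'hni = (A_minIndex la).2 := by
        rw [← List.getD_eq_getElem la 0 hni]; exact hng
      have hAms := setset_multiset la (A_maxIndex la).1 (A_minIndex la).1 hmi hni hij
        (PySem.Int.floordiv (A_maxIndex la).2 p) ((A_minIndex la).2 * p)
      rw [hEI, hEJ] at hAms
      have h0ne : (0 : Nat) ≠ (PySem.List.sorted lb (fun x => x) false).length - 1 := by omega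
      have hES0 : (PySem.List.sorted lb (fun x => x) false)[(0 : Nat)]'hs0
          = (A_minIndex la).2 := by
        rw [← List.getD_eq_getElem _ 0 hs0]; exact hlo
      have hESl : (PySem.List.sorted lb (fun x => x) false)[
          (PySem.List.sorted lb (fun x => x) false).length - 1]'hsl = (A_maxIndex la).2 := by
        rw [← List.getD_eq_getElem _ 0 hsl]; exact hhi
      have hBms := setset_multiset (PySem.List.sorted lb (fun x => x) false) 0
        ((PySem.List.sorted lb (fun x => x) false).length - 1) hs0 hsl h0ne
        ((A_minIndex la).2 * p) (PySem.Int.floordiv (A_maxIndex la).2 p)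
      rw [hES0, hESl] at hBms
      have hseq : ((PySem.List.sorted lb (fun x => x) false : List Int) : Multiset Int)
          = (la : Multiset Int) := Multiset.coe_eq_coe.mpr (hsperm.trans hperm.symm)
      rw [hseq] at hBms
      rw [Multiset.pair_comm ((A_minIndex la).2) ((A_maxIndex la).2),
        Multiset.pair_comm ((A_minIndex la).2 * p) (PySem.Int.floordiv (A_maxIndex la).2 p)]
        at hBms
      have hmseq : ((((la.set (A_maxIndex la).1 (PySem.Int.floordiv (A_maxIndex la).2 p)).set
          (A_minIndex la).1 ((A_minIndex la).2 * p)) : List Int) : Multiset Int)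
          = ((((PySem.List.sorted lb (fun x => x) false).set 0 ((A_minIndex la).2 * p)).set
            ((PySem.List.sorted lb (fun x => x) false).length - 1)
            (PySem.Int.floordiv (A_maxIndex la).2 p) : List Int) : Multiset Int) := by
        have := hAms.trans hBms.symm
        exact add_right_cancel this
      have hnext : ((la.set (A_maxIndex la).1 (PySem.Int.floordiv (A_maxIndex la).2 p)).set
          (A_minIndex la).1 ((A_minIndex la).2 * p)).Perm
          (((PySem.List.sorted lb (fun x => x) false).set 0 ((A_minIndex la).2 * p)).set
            ((PySem.List.sorted lb (fun x => x) false).length - 1)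
            (PySem.Int.floordiv (A_maxIndex la).2 p)) := Multiset.coe_eq_coe.mp hmseq
      have hsumA : ((la.set (A_maxIndex la).1 (PySem.Int.floordiv (A_maxIndex la).2 p)).set
          (A_minIndex la).1 ((A_minIndex la).2 * p)).sum
          + ((A_maxIndex la).2 + (A_minIndex la).2)
          = la.sum + (PySem.Int.floordiv (A_maxIndex la).2 p + (A_minIndex la).2 * p) := by
        have h := congrArg Multiset.sum hAms
        simp [Multiset.insert_eq_cons] at h
        linarith
      have hdec : ((la.set (A_maxIndex la).1 (PySem.Int.floordiv (A_maxIndex la).2 p)).set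
          (A_minIndex la).1 ((A_minIndex la).2 * p)).sum < la.sum := by nlinarith
      have hnextone : ∀ x ∈ ((la.set (A_maxIndex la).1
          (PySem.Int.floordiv (A_maxIndex la).2 p)).set
          (A_minIndex la).1 ((A_minIndex la).2 * p)), 1 ≤ x := by
        intro x hx
        rcases List.mem_or_eq_of_mem_set hx with hx1 | rfl
        · rcases List.mem_or_eq_of_mem_set hx1 with hx2 | rfl
          · exact hone x hx2
          · omega
        · nlinarith
      have hsum0 : 0 ≤ ((la.set (A_maxIndex la).1
          (PySem.Int.floordiv (A_maxIndex la).2 p)).set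
          (A_minIndex la).1 ((A_minIndex la).2 * p)).sum := (one_le_sum _ hnextone).1
      have hsum1 : 1 ≤ la.sum := (one_le_sum la hone).2 hne
      have hgA : ((la.set (A_maxIndex la).1 (PySem.Int.floordiv (A_maxIndex la).2 p)).set
          (A_minIndex la).1 ((A_minIndex la).2 * p)).sum.toNat < la.sum.toNat := by omega
      have hsumB : (((PySem.List.sorted lb (fun x => x) false).set 0
          ((A_minIndex la).2 * p)).set
          ((PySem.List.sorted lb (fun x => x) false).length - 1)
          (PySem.Int.floordiv (A_maxIndex la).2 p)).sum
          = ((la.set (A_maxIndex la).1 (PySem.Int.floordiv (A_maxIndex la).2 p)).set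
            (A_minIndex la).1 ((A_minIndex la).2 * p)).sum := hnext.symm.sum_eq
      have hlbsum : lb.sum = la.sum := hperm.sum_eq.symm
      have hgB : (((PySem.List.sorted lb (fun x => x) false).set 0
          ((A_minIndex la).2 * p)).set
          ((PySem.List.sorted lb (fun x => x) false).length - 1)
          (PySem.Int.floordiv (A_maxIndex la).2 p)).sum.toNat < lb.sum.toNat := by
        rw [hsumB, hlbsum]; exact hgA
      have stepA : A_balance p la = A_balance p ((la.set (A_maxIndex la).1
          (PySem.Int.floordiv (A_maxIndex la).2 p)).set
          (A_minIndex la).1 ((A_minIndex la).2 * p)) := by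
        conv_lhs => rw [A_balance]
        rw [dif_pos ⟨hgt, beq_iff_eq.mpr hmod, hgA⟩]
      have stepB : B_balance p lb = B_balance p
          (((PySem.List.sorted lb (fun x => x) false).set 0 ((A_minIndex la).2 * p)).set
          ((PySem.List.sorted lb (fun x => x) false).length - 1)
          (PySem.Int.floordiv (A_maxIndex la).2 p)) := by
        conv_lhs => rw [B_balance]
        rw [hlo, hhi]
        rw [dif_pos ⟨hgt, beq_iff_eq.mpr hmod, hgB⟩]
      rw [stepA, stepB]
      exact ih _ _ (by omega) hnext
        (by
          intro hnil
          have hlen := congrArg List.length hnil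
          simp only [List.length_set, List.length_nil] at hlen
          omega)
        hnextone
    · -- the loop stops on both sides
      have hstopA : A_balance p la = la := by
        conv_lhs => rw [A_balance]
        rw [dif_neg]
        rintro ⟨c1, c2, -⟩
        exact hc ⟨c1, beq_iff_eq.mp c2⟩
      have hstopB : B_balance p lb = PySem.List.sorted lb (fun x => x) false := by
        conv_lhs => rw [B_balance]
        rw [hlo, hhi]
        rw [dif_neg]
        rintro ⟨c1, c2, -⟩
        exact hc ⟨c1, beq_iff_eq.mp c2⟩
      rw [hstopA, hstopB]
      exact ⟨hperm.trans hsperm.symm, hone⟩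

theorem A_balance_length (v : Int) (l : List Int) : (A_balance v l).length = l.length := by
  fun_induction A_balance v l with
  | case1 l mx mn next h ih => rw [ih]; simp [next, mx, mn]
  | case2 l mx mn next h => rfl

theorem fold_balance_lockstep (ps : List Int) :
    ∀ (la lb : List Int), (∀ p ∈ ps, 2 ≤ p) → la.Perm lb → la ≠ [] → (∀ x ∈ la, 1 ≤ x) →
    (ps.foldl (fun r v => A_balance v r) la).Perm (ps.foldl (fun sl p => B_balance p sl) lb) ∧
    (∀ x ∈ ps.foldl (fun r v => A_balance v r) la, 1 ≤ x) := by
  induction ps with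
  | nil => intro la lb _ hperm _ hone; exact ⟨hperm, hone⟩
  | cons q ps ih =>
    intro la lb hps hperm hne hone
    obtain ⟨hstep, hstepone⟩ :=
      balance_lockstep q (hps q (by simp)) la.sum.toNat la lb (le_refl _) hperm hne hone
    simp only [List.foldl_cons]
    have hne' : A_balance q la ≠ [] := by
      intro hnil
      have hlen := congrArg List.length hnil
      rw [A_balance_length] at hlen
      simp at hlen
      exact hne hlen
    exact ih (A_balance q la) (B_balance q lb) (fun p hp => hps p (by simp [hp]))
      hstep hne' hstepone

theorem sorted_rev_eq_of_desc (xs l : List Int) (h : xs.Perm l)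
    (hl : l.Pairwise (fun a b => b ≤ a)) : PySem.List.sorted xs (fun x => x) true = l := by
  apply PySem.List.eq_of_perm_of_pairwise_le_of_injective (fun x : Int => -x) neg_injective
  · exact (PySem.List.sorted_perm xs _ true).trans h
  · exact (PySem.List.sorted_pairwise_rev xs (fun x => x)).imp (fun hab => neg_le_neg hab)
  · exact hl.imp (fun hab => neg_le_neg hab)

theorem sorted_rev_eq_of_perm (xs ys : List Int) (h : xs.Perm ys) :
    PySem.List.sorted xs (fun x => x) true = PySem.List.sorted ys (fun x => x) true := by
  apply sorted_rev_eq_of_desc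
  · exact h.trans (PySem.List.sorted_perm ys _ true).symm
  · exact PySem.List.sorted_pairwise_rev ys (fun x => x)

theorem phase1_entries (dim : Int) (hdim : 0 < dim) : ∀ (ps : List (Int × Nat)) (init : List Int),
    init.length = dim.toNat → (∀ x ∈ init, 1 ≤ x) → (∀ q ∈ ps, 1 ≤ q.1) →
    (ps.foldl (B_step dim) init).length = dim.toNat ∧ (∀ x ∈ ps.foldl (B_step dim) init, 1 ≤ x) := by
  intro ps
  induction ps with
  | nil => intro init hlen hone _; exact ⟨hlen, hone⟩
  | cons kp ps ih =>
    intro init hlen hone hps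
    simp only [List.foldl_cons]
    have hidx : (PySem.Int.mod (kp.2 : Int) dim).toNat < init.length := by
      have h1 := PySem.Int.mod_nonneg (kp.2 : Int) hdim
      have h2 := PySem.Int.mod_lt (kp.2 : Int) hdim
      omega
    have hstep_len : (B_step dim init kp).length = dim.toNat := by
      simp only [B_step, List.length_set]; exact hlen
    have hstep_one : ∀ x ∈ B_step dim init kp, 1 ≤ x := by
      intro x hx
      simp only [B_step] at hx
      rcases List.mem_or_eq_of_mem_set hx with hmem | rfl
      · exact hone x hmem
      · have hget : init.getD (PySem.Int.mod (kp.2 : Int) dim).toNat 0 ∈ init := by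
          rw [List.getD_eq_getElem init 0 hidx]; exact List.getElem_mem hidx
        have h1 := hone _ hget
        have h2 := hps kp (by simp)
        nlinarith
    exact ih (B_step dim init kp) hstep_len hstep_one (fun q hq => hps q (by simp [hq]))

theorem result0_eq (dim : Int) :
    (PySem.List.pyRange 0 dim 1).map (fun _ => (1 : Int)) = List.replicate dim.toNat 1 := by
  rw [PySem.List.pyRange_one, List.map_map]
  simp [Function.comp_def]

-- ===== VERDICT (by name: the statement is the Claim_ definition above) =====
theorem replicate_desc (k : Nat) (a : Int) :
    (List.replicate k a).Pairwise (fun x y => y ≤ x) := by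
  apply List.pairwise_iff_getElem.mpr
  intro i j hi hj hij
  simp only [List.getElem_replicate]
  exact le_refl a

theorem make_process_grid_spec : Claim_equal_make_process_grid := by
  unfold Claim_equal_make_process_grid
  intro n dim _ hpre
  obtain ⟨hn, hdim⟩ := hpre
  unfold Spec_make_process_grid
  unfold make_process_grid make_process_grid_alt
  rw [show (fun (sl : List Int) (kp : Int × Nat) =>
      let idx := (PySem.Int.mod (kp.2 : Int) dim).toNat
      sl.set idx (sl.getD idx 0 * kp.1)) = B_step dim from rfl]
  rw [result0_eq, PySem.List.pyRepeat_singleton]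
  by_cases h1 : n = 1
  · subst h1
    rw [if_pos (by rfl)]
    have hBt : B_tdiv 1 2 = ([], []) := by
      rw [B_tdiv]
      rw [dif_neg (by rintro ⟨⟨-, hx⟩, -⟩; norm_num at hx)]
      rw [if_neg (by norm_num)]
    rw [hBt]
    simp only [List.zipIdx_nil, List.foldl_nil]
    exact (sorted_rev_eq_of_desc _ _ (List.Perm.refl _) (replicate_desc _ _)).symm
  · by_cases h2 : n = 2
    · subst h2
      rw [if_neg (by intro h; rw [beq_iff_eq] at h; omega), if_pos (by rfl)]
      have hBt : B_tdiv 2 2 = ([2], [2]) := by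
        rw [B_tdiv]
        rw [dif_neg (by rintro ⟨⟨-, hx⟩, -⟩; norm_num at hx)]
        rw [if_pos (by norm_num)]
      rw [hBt]
      have hmod0 : (PySem.Int.mod ((0 : Nat) : Int) dim).toNat = 0 := by
        have : PySem.Int.mod ((0 : Nat) : Int) dim = 0 :=
          (PySem.Int.mod_eq_zero_iff_dvd _ _).mpr (dvd_zero _)
        rw [this]; rfl
      have hk1 : 1 ≤ dim.toNat := by omega
      have hget : (List.replicate dim.toNat (1 : Int)).getD 0 0 = 1 := by
        rw [List.getD_eq_getElem _ 0 (by simp only [List.length_replicate]; omega)]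
        simp
      simp only [List.zipIdx_cons, List.zipIdx_nil, List.foldl_cons, List.foldl_nil]
      have hS1' : (B_step dim (List.replicate dim.toNat 1) (2, 0))
          = (List.replicate dim.toNat (1 : Int)).set 0 2 := by
        simp only [B_step, hmod0, hget]
        norm_num
      rw [hS1']
      -- shape of the dealt list: [2, 1, …, 1]
      have hL : (List.replicate dim.toNat (1 : Int)).set 0 2
          = 2 :: List.replicate (dim.toNat - 1) 1 := by
        obtain ⟨k, hk⟩ : ∃ k, dim.toNat = k + 1 := ⟨dim.toNat - 1, by omega⟩
        rw [hk, List.replicate_succ]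
        simp
      have hLdesc : ((List.replicate dim.toNat (1 : Int)).set 0 2).Pairwise
          (fun x y => y ≤ x) := by
        rw [hL]
        apply List.pairwise_cons.mpr
        refine ⟨fun y hy => ?_, replicate_desc _ _⟩
        rw [List.eq_of_mem_replicate hy]
        norm_num
      have hLone : ∀ x ∈ (List.replicate dim.toNat (1 : Int)).set 0 2, 1 ≤ x := by
        intro x hx
        rcases List.mem_or_eq_of_mem_set hx with hx1 | rfl
        · rw [List.eq_of_mem_replicate hx1]
        · norm_num
      have hLtwo : ∀ x ∈ (List.replicate dim.toNat (1 : Int)).set 0 2, x ≤ 2 := by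
        intro x hx
        rcases List.mem_or_eq_of_mem_set hx with hx1 | rfl
        · rw [List.eq_of_mem_replicate hx1]; norm_num
        · exact le_refl _
      have hLne : (List.replicate dim.toNat (1 : Int)).set 0 2 ≠ [] := by
        rw [hL]; exact List.cons_ne_nil _ _
      have hsperm := PySem.List.sorted_perm ((List.replicate dim.toNat (1 : Int)).set 0 2)
        (fun x => x) false
      have hsne : PySem.List.sorted ((List.replicate dim.toNat (1 : Int)).set 0 2)
          (fun x => x) false ≠ [] := by
        intro hnil
        rw [hnil] at hsperm
        exact hLne (hsperm.symm.eq_nil)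
      have hs0 : 0 < (PySem.List.sorted ((List.replicate dim.toNat (1 : Int)).set 0 2)
          (fun x => x) false).length := List.length_pos_iff.mpr hsne
      have hstop : B_balance 2 ((List.replicate dim.toNat (1 : Int)).set 0 2)
          = PySem.List.sorted ((List.replicate dim.toNat (1 : Int)).set 0 2)
            (fun x => x) false := by
        conv_lhs => rw [B_balance]
        rw [dif_neg]
        rintro ⟨c1, -, -⟩
        have hlomem : (PySem.List.sorted ((List.replicate dim.toNat (1 : Int)).set 0 2)
            (fun x => x) false).getD 0 0 ∈ (List.replicate dim.toNat (1 : Int)).set 0 2 := by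
          refine hsperm.mem_iff.mp ?_
          rw [List.getD_eq_getElem _ 0 hs0]
          exact List.getElem_mem hs0
        have hsl : (PySem.List.sorted ((List.replicate dim.toNat (1 : Int)).set 0 2)
            (fun x => x) false).length - 1 < (PySem.List.sorted
            ((List.replicate dim.toNat (1 : Int)).set 0 2) (fun x => x) false).length := by
          omega
        have hhimem : (PySem.List.sorted ((List.replicate dim.toNat (1 : Int)).set 0 2)
            (fun x => x) false).getD ((PySem.List.sorted
            ((List.replicate dim.toNat (1 : Int)).set 0 2) (fun x => x) false).length - 1) 0
            ∈ (List.replicate dim.toNat (1 : Int)).set 0 2 := by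
          refine hsperm.mem_iff.mp ?_
          rw [List.getD_eq_getElem _ 0 hsl]
          exact List.getElem_mem hsl
        have hlo1 := hLone _ hlomem
        have hhi2 := hLtwo _ hhimem
        omega
      rw [hstop]
      exact (sorted_rev_eq_of_desc _ _ hsperm hLdesc).symm
    · -- main case: n ≥ 3
      have hn3 : 3 ≤ n := by omega
      rw [if_neg (by intro h; rw [beq_iff_eq] at h; omega),
        if_neg (by intro h; rw [beq_iff_eq] at h; omega)]
      have hInv : TDInv n 2 := ⟨by omega, by omega, fun q hq _ => hq⟩
      rw [A_primeFactors_eq n (by omega)]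
      rw [phase1_eq dim n 2 hInv (List.replicate dim.toNat 1) 0 (le_refl 0)]
      rw [show ((0 : Int)).toNat = 0 from rfl]
      obtain ⟨hmem, -, -, hflat⟩ := B_tdiv_spec n 2 hInv
      have hps : ∀ p ∈ (B_tdiv n 2).2, 2 ≤ p := fun p hp => ((hmem p).mp hp).1.1
      have hzip1 : ∀ q ∈ (B_tdiv n 2).1.zipIdx 0, 1 ≤ q.1 := by
        rintro ⟨x, i⟩ hq
        obtain ⟨h1i, h2i, hx⟩ := List.mem_zipIdx hq
        have hxm : x ∈ (B_tdiv n 2).1 := by rw [hx]; exact List.getElem_mem (by omega)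
        have := hflat x hxm
        omega
      obtain ⟨hS1len, hS1one⟩ := phase1_entries dim (by omega) ((B_tdiv n 2).1.zipIdx 0)
        (List.replicate dim.toNat 1) (by simp)
        (fun x hx => by rw [List.eq_of_mem_replicate hx]) hzip1
      have hS1ne : ((B_tdiv n 2).1.zipIdx 0).foldl (B_step dim) (List.replicate dim.toNat 1)
          ≠ [] := by
        intro hnil
        rw [hnil] at hS1len
        simp at hS1len
        omega
      have hr1perm := PySem.List.sorted_perm (((B_tdiv n 2).1.zipIdx 0).foldl (B_step dim)
        (List.replicate dim.toNat 1)) (fun x => x) true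
      have hr1ne : PySem.List.sorted (((B_tdiv n 2).1.zipIdx 0).foldl (B_step dim)
          (List.replicate dim.toNat 1)) (fun x => x) true ≠ [] := by
        intro hnil
        rw [hnil] at hr1perm
        exact hS1ne (hr1perm.symm.eq_nil)
      have hfold := fold_balance_lockstep ((B_tdiv n 2).2) _ _ hps hr1perm hr1ne
        (fun x hx => hS1one x (hr1perm.mem_iff.mp hx))
      exact sorted_rev_eq_of_perm _ _ hfold.1
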